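-- pv_equiv track=rewrite | github.com/GITHUBLOGANG/EasyStockPredict | PredictStock.py | _segments_from_binary_series
-- ===== SOURCE A (Python) =====
-- def _segments_from_binary_series(binary_series):
--     # 将0/1持仓序列划分为连续片段
--     segs = []
--     in_seg = False
--     start = None
--     for idx, val in binary_series.items():
--         if val and not in_seg:
--             in_seg = True
--             start = idx
--         elif not val and in_seg:
--             segs.append((start, prev_idx))
--             in_seg = False
--         prev_idx = idx
--     if in_seg:
--         segs.append((start, prev_idx))
--     return segs
-- ===== SOURCE B (Python) =====
-- from itertools import groupby
--
--
-- def _segments_from_binary_series(binary_series):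
--     segs = []
--     for key, grp in groupby(binary_series.items(), key=lambda kv: bool(kv[1])):
--         if key:
--             run = list(grp)
--             segs.append((run[0][0], run[-1][0]))
--     return segs
-- ===== Notes on version B (the rewrite author's own statement) =====
-- stated objective: idiomatic
-- what changed: Replaces the in_seg/start/prev_idx state machine with itertools.groupby over items keyed by truthiness, emitting (first, last) index of each truthy run.
import Mathlib
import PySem

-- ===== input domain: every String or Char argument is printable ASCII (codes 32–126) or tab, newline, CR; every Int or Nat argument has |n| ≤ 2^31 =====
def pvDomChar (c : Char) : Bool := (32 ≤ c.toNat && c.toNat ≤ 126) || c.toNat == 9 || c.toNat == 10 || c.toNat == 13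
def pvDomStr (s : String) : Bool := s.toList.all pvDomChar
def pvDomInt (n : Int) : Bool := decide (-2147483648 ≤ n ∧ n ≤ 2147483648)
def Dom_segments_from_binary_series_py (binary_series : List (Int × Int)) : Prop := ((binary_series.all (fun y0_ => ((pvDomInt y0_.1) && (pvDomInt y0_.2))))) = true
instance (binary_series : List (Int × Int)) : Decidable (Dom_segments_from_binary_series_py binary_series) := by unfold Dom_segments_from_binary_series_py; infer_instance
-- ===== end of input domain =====

-- B replaces A's in_seg/start/prev state machine by a group-runs-then-emit pass (idiomatic groupby); same O(n) cost.


-- ===== PORT A =====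
-- A's loop: state (segs, in_seg, start, prev_idx).  Python's `start = None` / unbound
-- `prev_idx` are modelled with dummy 0: both are assigned before their only uses
-- (start is read only while in_seg; prev_idx is read only after ≥1 iteration while in_seg).
def pvLoopA : List (Int × Int) → List (Int × Int) → Bool → Int → Int → List (Int × Int)
  | [], segs, in_seg, start, prev =>
      if in_seg then segs ++ [(start, prev)] else segs
  | (idx, val) :: t, segs, in_seg, start, prev =>
      if val ≠ 0 ∧ in_seg = false then pvLoopA t segs true idx idx
      else if val = 0 ∧ in_seg = true then pvLoopA t (segs ++ [(start, prev)]) false start idx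
      else pvLoopA t segs in_seg start idx

def segments_from_binary_series_py (binary_series : List (Int × Int)) : List (Int × Int) :=
  pvLoopA binary_series [] false 0 0

-- ===== PORT B =====
-- groupby(items, key = truthiness): take the maximal run of items sharing the head's key;
-- emit (first idx, last idx) when the key is truthy, then continue after the run.
def pvAltGo : List (Int × Int) → List (Int × Int)
  | [] => []
  | (idx, val) :: t =>
      let k := decide (val ≠ 0)
      let rest := t.dropWhile (fun p => decide (p.2 ≠ 0) == k)
      if k then (idx, ((t.takeWhile (fun p => decide (p.2 ≠ 0) == k)).getLastD (idx, val)).1) :: pvAltGo rest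
      else pvAltGo rest
  termination_by l => l.length
  decreasing_by
    · exact Nat.lt_succ_of_le (t.length_dropWhile_le _)
    · exact Nat.lt_succ_of_le (t.length_dropWhile_le _)

def segments_from_binary_series_py_alt (binary_series : List (Int × Int)) : List (Int × Int) :=
  pvAltGo binary_series

-- ===== PRECONDITION & SPEC =====
def Spec_segments_from_binary_series_py (binary_series : List (Int × Int)) (out : List (Int × Int)) : Prop := out = segments_from_binary_series_py_alt binary_series
instance (binary_series : List (Int × Int)) (out : List (Int × Int)) : Decidable (Spec_segments_from_binary_series_py binary_series out) := by unfold Spec_segments_from_binary_series_py; infer_instance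

-- ===== CLAIM (what is proved, stated in full; the proofs are below) =====
def Claim_equal_segments_from_binary_series_py : Prop := ∀ (binary_series : List (Int × Int)), Dom_segments_from_binary_series_py binary_series → Spec_segments_from_binary_series_py binary_series (segments_from_binary_series_py binary_series)

-- ===== LEMMAS AND PROOFS =====

-- the first element of getLastD only depends on the default's first component
theorem pvGetLastD_fst (l : List (Int × Int)) (a b : Int × Int) (h : a.1 = b.1) :
    (l.getLastD a).1 = (l.getLastD b).1 := by
  rw [List.getLastD_eq_getLast?, List.getLastD_eq_getLast?]
  cases l.getLast? with
  | none => simpa using h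
  | some x => rfl

-- skipping a maximal falsy prefix does not change pvAltGo's result
theorem pvAltGo_dropFalsy (l : List (Int × Int)) :
    pvAltGo (l.dropWhile (fun p => p.2 == 0)) = pvAltGo l := by
  induction l with
  | nil => rfl
  | cons h t ih =>
      obtain ⟨i, v⟩ := h
      by_cases hv : v = 0
      · subst hv
        rw [List.dropWhile_cons_of_pos (by simp), ih, pvAltGo]
        have h1 : (fun p : Int × Int => decide (p.2 ≠ 0) == decide ((0:Int) ≠ 0)) =
            (fun p : Int × Int => p.2 == 0) := by
          funext q; by_cases h : q.2 = 0 <;> simp [h]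
        rw [h1, ih]
        simp
      · rw [List.dropWhile_cons_of_neg (by simp [hv])]

theorem pvAltGo_cons_falsy (i : Int) (t : List (Int × Int)) :
    pvAltGo ((i, 0) :: t) = pvAltGo t := by
  rw [pvAltGo]
  have h1 : (fun p : Int × Int => decide (p.2 ≠ 0) == decide ((0:Int) ≠ 0)) =
      (fun p : Int × Int => p.2 == 0) := by
    funext q; by_cases h : q.2 = 0 <;> simp [h]
  rw [h1, pvAltGo_dropFalsy]
  simp

-- main invariant relating both states of A's loop to B's run recursion
theorem pvLoop_main : ∀ n (l : List (Int × Int)), l.length ≤ n →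
    (∀ segs s p, pvLoopA l segs false s p = segs ++ pvAltGo l) ∧
    (∀ segs s p, pvLoopA l segs true s p =
      segs ++ (s, ((l.takeWhile (fun q => decide (q.2 ≠ 0))).getLastD (p, 0)).1)
        :: pvAltGo (l.dropWhile (fun q => decide (q.2 ≠ 0)))) := by
  intro n
  induction n with
  | zero =>
      intro l hl
      have : l = [] := List.length_eq_zero_iff.mp (Nat.le_zero.mp hl)
      subst this
      exact ⟨fun segs s p => by simp [pvLoopA, pvAltGo],
             fun segs s p => by simp [pvLoopA, pvAltGo]⟩
  | succ n ih =>
      intro l hl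
      match l with
      | [] =>
          exact ⟨fun segs s p => by simp [pvLoopA, pvAltGo],
                 fun segs s p => by simp [pvLoopA, pvAltGo]⟩
      | (i, v) :: t =>
          have ht : t.length ≤ n := by simpa using Nat.lt_succ_iff.mp (Nat.lt_of_lt_of_le (by simp) hl)
          constructor
          · intro segs s p
            by_cases hv : v = 0
            · -- falsy head, not in segment: A takes the pass-through branch, B skips the falsy run
              subst hv
              rw [pvLoopA, if_neg (by simp), if_neg (by simp)]
              rw [(ih t ht).1 segs s i, pvAltGo_cons_falsy]
            · -- truthy head: A opens a segment, B emits the run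
              rw [pvLoopA, if_pos ⟨hv, rfl⟩]
              rw [(ih t ht).2 segs i i, pvAltGo]
              have hk : decide (v ≠ 0) = true := by simp [hv]
              rw [hk]
              have hfun : (fun p : Int × Int => decide (p.2 ≠ 0) == true) =
                  (fun q : Int × Int => decide (q.2 ≠ 0)) := by funext q; simp
              rw [hfun, if_pos rfl]
              rw [pvGetLastD_fst _ (i, 0) (i, v) rfl]
          · intro segs s p
            by_cases hv : v = 0
            · -- falsy head while in segment: A closes the segment
              subst hv
              rw [pvLoopA, if_neg (by simp), if_pos ⟨rfl, rfl⟩]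
              rw [(ih t ht).1 (segs ++ [(s, p)]) s i]
              rw [List.takeWhile_cons_of_neg (by simp), List.dropWhile_cons_of_neg (by simp)]
              rw [pvAltGo_cons_falsy]
              simp
            · -- truthy head while in segment: continue the run
              rw [pvLoopA, if_neg (by simp), if_neg (by simp [hv])]
              rw [(ih t ht).2 segs s i]
              rw [List.takeWhile_cons_of_pos (by simp [hv]), List.dropWhile_cons_of_pos (by simp [hv])]
              rw [List.getLastD_cons]
              rw [pvGetLastD_fst _ (i, 0) (i, v) rfl]

-- ===== VERDICT (by name: the statement is the Claim_ definition above) =====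
theorem segments_from_binary_series_py_spec : Claim_equal_segments_from_binary_series_py := by
  intro l _
  unfold Spec_segments_from_binary_series_py segments_from_binary_series_py segments_from_binary_series_py_alt
  simpa using (pvLoop_main l.length l le_rfl).1 [] 0 0
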